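-- pv_equiv track=rewrite | github.com/KAUSHIK1205/khkhhk | jj.py | separate_and_square
-- ===== SOURCE A (Python) =====
-- def separate_and_square(start, end):
--     odd_squares = {}
--     even_squares = {}
--
--     for number in range(start, end + 1):
--         square = number ** 2
--
--         if number % 2 == 0:
--             even_squares[number] = square
--         else:
--             odd_squares[number] = square
--
--     return odd_squares, even_squares
-- ===== SOURCE B (Python) =====
-- def separate_and_square(start, end):
--     first_even = start if start % 2 == 0 else start + 1
--     first_odd = start if start % 2 == 1 else start + 1
--     odd_squares = {n: n ** 2 for n in range(first_odd, end + 1, 2)}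
--     even_squares = {n: n ** 2 for n in range(first_even, end + 1, 2)}
--     return odd_squares, even_squares
-- ===== Notes on version B (the rewrite author's own statement) =====
-- stated objective: alternative
-- what changed: Replaces the single range pass with a per-element parity branch by two branch-free strided passes: dict comprehensions over range(first_odd, end+1, 2) and range(first_even, end+1, 2), which reproduce the same keys, values and insertion order.
import Mathlib
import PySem

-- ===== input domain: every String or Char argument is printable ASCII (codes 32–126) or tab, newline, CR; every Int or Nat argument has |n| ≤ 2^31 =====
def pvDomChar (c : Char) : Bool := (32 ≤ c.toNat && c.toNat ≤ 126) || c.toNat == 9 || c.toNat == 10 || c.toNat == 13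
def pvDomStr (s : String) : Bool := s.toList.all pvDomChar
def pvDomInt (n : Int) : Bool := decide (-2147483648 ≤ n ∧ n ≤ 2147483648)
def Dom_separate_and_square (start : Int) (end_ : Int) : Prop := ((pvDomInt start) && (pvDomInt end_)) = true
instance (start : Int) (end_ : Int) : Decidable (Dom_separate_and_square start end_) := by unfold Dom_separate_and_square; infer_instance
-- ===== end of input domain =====

-- B replaces A's per-element parity branch by two branch-free strided passes (step-2 ranges); same cost, different decomposition.

-- ===== PORT A =====
-- the loop body of A (square then branch on parity), as a named helper
def pvStepA (acc : PySem.Dict Int Int × PySem.Dict Int Int) (number : Int) :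
    PySem.Dict Int Int × PySem.Dict Int Int :=
  let square := number ^ 2
  if PySem.Int.mod number 2 == 0 then (acc.1, acc.2.insert number square)
  else (acc.1.insert number square, acc.2)

def separate_and_square (start : Int) (end_ : Int) : (List (Int × Int)) × (List (Int × Int)) :=
  let r := (PySem.List.pyRange start (end_ + 1) 1).foldl pvStepA (PySem.Dict.empty, PySem.Dict.empty)
  (r.1.items, r.2.items)

-- ===== PORT B =====
def separate_and_square_alt (start : Int) (end_ : Int) : (List (Int × Int)) × (List (Int × Int)) :=
  let first_even := if PySem.Int.mod start 2 == 0 then start else start + 1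
  let first_odd := if PySem.Int.mod start 2 == 1 then start else start + 1
  -- dict comprehensions over step-2 ranges: the keys are distinct, so the assoc list is the map
  let odd_squares := (PySem.List.pyRange first_odd (end_ + 1) 2).map (fun n => (n, n ^ 2))
  let even_squares := (PySem.List.pyRange first_even (end_ + 1) 2).map (fun n => (n, n ^ 2))
  (odd_squares, even_squares)

-- ===== PRECONDITION & SPEC =====
def Spec_separate_and_square (start : Int) (end_ : Int) (out : (List (Int × Int)) × (List (Int × Int))) : Prop := out = separate_and_square_alt start end_
instance (start : Int) (end_ : Int) (out : (List (Int × Int)) × (List (Int × Int))) : Decidable (Spec_separate_and_square start end_ out) := by unfold Spec_separate_and_square; infer_instance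

-- ===== CLAIM (what is proved, stated in full; the proofs are below) =====
def Claim_equal_separate_and_square : Prop := ∀ (start : Int) (end_ : Int), Dom_separate_and_square start end_ → Spec_separate_and_square start end_ (separate_and_square start end_)

-- ===== LEMMAS AND PROOFS =====

lemma pvMod2 (a : Int) : PySem.Int.mod a 2 = a % 2 := by
  simp [PySem.Int.mod, Int.fmod_eq_emod]

lemma pvRange2_nil {a b : Int} (h : b ≤ a) : PySem.List.pyRange a b 2 = [] := by
  rw [PySem.List.pyRange_of_pos a b (by norm_num)]
  simp [if_neg (by omega : ¬ a < b)]

lemma pvRange2_cons {a b : Int} (h : a < b) :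
    PySem.List.pyRange a b 2 = a :: PySem.List.pyRange (a + 2) b 2 := by
  rw [PySem.List.pyRange_of_pos a b (by norm_num), PySem.List.pyRange_of_pos (a + 2) b (by norm_num)]
  rw [if_pos h]
  have hcnt : ((b - a + 2 - 1) / 2).toNat
      = (if a + 2 < b then ((b - (a + 2) + 2 - 1) / 2).toNat else 0) + 1 := by
    split_ifs with h2
    · have e1 : b - a + 2 - 1 = (b - (a + 2) + 2 - 1) + 1 * 2 := by ring
      rw [e1, Int.add_mul_ediv_right _ _ (by norm_num : (2:Int) ≠ 0)]
      omega
    · have : (b - a + 2 - 1) / 2 = 1 := by omega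
      rw [this]; rfl
  rw [hcnt, List.range_succ_eq_map]
  simp only [List.map_cons, List.map_map]
  congr 1
  · simp
  · apply List.map_congr_left
    intro k _
    simp only [Function.comp_apply]
    push_cast
    ring

-- the main invariant: folding A's loop body over range(a, b) with dicts whose keys
-- are all below a appends exactly the odd / even strided tails to their items
lemma pvMainA (n : Nat) : ∀ (a b : Int), (b - a).toNat = n →
    ∀ (od ev : PySem.Dict Int Int),
    (∀ k ∈ od.keys, k < a) → (∀ k ∈ ev.keys, k < a) →
    ((PySem.List.pyRange a b 1).foldl pvStepA (od, ev)).1.items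
        = od.items ++ (PySem.List.pyRange (if a % 2 == 1 then a else a + 1) b 2).map (fun n => (n, n ^ 2)) ∧
    ((PySem.List.pyRange a b 1).foldl pvStepA (od, ev)).2.items
        = ev.items ++ (PySem.List.pyRange (if a % 2 == 0 then a else a + 1) b 2).map (fun n => (n, n ^ 2)) := by
  induction n with
  | zero =>
    intro a b hn od ev _ _
    have hba : b ≤ a := by omega
    rw [PySem.List.pyRange_one_eq_nil hba]
    have e1 : PySem.List.pyRange (if a % 2 == 1 then a else a + 1) b 2 = [] :=
      pvRange2_nil (by split_ifs <;> omega)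
    have e2 : PySem.List.pyRange (if a % 2 == 0 then a else a + 1) b 2 = [] :=
      pvRange2_nil (by split_ifs <;> omega)
    rw [e1, e2]
    simp
  | succ m ih =>
    intro a b hn od ev hod hev
    have hab : a < b := by omega
    rw [PySem.List.pyRange_one_cons hab]
    simp only [List.foldl_cons]
    have hmod : a % 2 = 0 ∨ a % 2 = 1 := by omega
    have ha2 : a + 1 + 1 = a + 2 := by ring
    rcases hmod with he | ho
    · -- a is even: the step inserts into the even dict
      have m1 : (a + 1) % 2 = 1 := by omega
      have hstep : pvStepA (od, ev) a = (od, ev.insert a (a ^ 2)) := by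
        simp only [pvStepA, pvMod2]
        rw [he]
        simp
      rw [hstep]
      have hna : a ∉ ev.keys := fun h => absurd (hev a h) (by omega)
      have hcont : ev.contains a = false := by
        by_contra h
        exact hna ((PySem.Dict.contains_iff_mem_keys ev a).mp (by simpa using h))
      obtain ⟨h1, h2⟩ := ih (a + 1) b (by omega) od (ev.insert a (a ^ 2))
        (fun k hk => by have := hod k hk; omega)
        (fun k hk => by
          rcases (PySem.Dict.mem_keys_insert ev a k (a ^ 2)).mp hk with rfl | hk'
          · omega
          · have := hev k hk'; omega)
      constructor
      · rw [h1]
        simp only [m1, he]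
        norm_num
      · rw [h2, PySem.Dict.items_insert_of_not_contains ev (a ^ 2) hcont]
        simp only [m1, he]
        norm_num
        rw [ha2, pvRange2_cons hab]
        simp
    · -- a is odd: the step inserts into the odd dict
      have m0 : (a + 1) % 2 = 0 := by omega
      have hstep : pvStepA (od, ev) a = (od.insert a (a ^ 2), ev) := by
        simp only [pvStepA, pvMod2]
        rw [ho]
        simp
      rw [hstep]
      have hna : a ∉ od.keys := fun h => absurd (hod a h) (by omega)
      have hcont : od.contains a = false := by
        by_contra h
        exact hna ((PySem.Dict.contains_iff_mem_keys od a).mp (by simpa using h))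
      obtain ⟨h1, h2⟩ := ih (a + 1) b (by omega) (od.insert a (a ^ 2)) ev
        (fun k hk => by
          rcases (PySem.Dict.mem_keys_insert od a k (a ^ 2)).mp hk with rfl | hk'
          · omega
          · have := hod k hk'; omega)
        (fun k hk => by have := hev k hk; omega)
      constructor
      · rw [h1, PySem.Dict.items_insert_of_not_contains od (a ^ 2) hcont]
        simp only [m0, ho]
        norm_num
        rw [ha2, pvRange2_cons hab]
        simp
      · rw [h2]
        simp only [m0, ho]
        norm_num

-- ===== VERDICT (by name: the statement is the Claim_ definition above) =====
theorem separate_and_square_spec : Claim_equal_separate_and_square := by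
  intro start end_ _
  unfold Spec_separate_and_square separate_and_square separate_and_square_alt
  obtain ⟨h1, h2⟩ := pvMainA (end_ + 1 - start).toNat start (end_ + 1) rfl
    PySem.Dict.empty PySem.Dict.empty
    (by simp [PySem.Dict.keys_empty]) (by simp [PySem.Dict.keys_empty])
  simp only [pvMod2]
  rw [h1, h2]
  rfl
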